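-- pv_equiv track=rewrite | github.com/danhpaiva/list-python-brasil | 05.exerciciosFuncoes/exercicio06.py | converter_hour
-- ===== SOURCE A (Python) =====
-- def converter_hour(hour, minute):
--     if hour > 12 and hour != 24:
--         counter = 0
--         for i in range(hour):
--             if i >= 12:
--                 counter += 1
--         return counter
--     elif hour == 24:
--         return 0
--     else:
--         return hour
-- ===== SOURCE B (Python) =====
-- def converter_hour(hour, minute):
--     if hour == 24:
--         return 0
--     if hour > 12:
--         return hour - 12
--     return hour
-- ===== Notes on version B (the rewrite author's own statement) =====
-- stated objective: simpler
-- what changed: Replaces the O(hour) counting loop over range(hour) with the closed-form subtraction hour - 12 (and an early return for 24), since counting i in range(hour) with i >= 12 equals hour - 12 when hour > 12.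
import Mathlib
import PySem

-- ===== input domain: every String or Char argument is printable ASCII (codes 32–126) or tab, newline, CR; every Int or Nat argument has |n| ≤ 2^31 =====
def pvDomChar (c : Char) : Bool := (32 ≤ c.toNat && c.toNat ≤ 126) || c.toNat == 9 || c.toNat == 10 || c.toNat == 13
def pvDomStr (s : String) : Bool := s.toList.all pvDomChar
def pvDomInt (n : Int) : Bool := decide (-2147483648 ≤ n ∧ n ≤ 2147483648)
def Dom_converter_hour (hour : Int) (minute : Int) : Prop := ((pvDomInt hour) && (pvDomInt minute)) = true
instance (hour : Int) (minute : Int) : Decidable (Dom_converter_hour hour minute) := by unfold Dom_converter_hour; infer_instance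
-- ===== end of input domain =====

-- B replaces A's counting loop over range(hour) with the closed-form hour - 12 (simpler, O(1)).


-- ===== PORT A =====
def converter_hour (hour : Int) (minute : Int) : Int :=
  if hour > 12 ∧ hour ≠ 24 then
    (PySem.List.pyRange 0 hour 1).foldl (fun counter i => if i ≥ 12 then counter + 1 else counter) 0
  else if hour = 24 then 0
  else hour

-- ===== PORT B =====
def converter_hour_alt (hour : Int) (minute : Int) : Int :=
  if hour = 24 then 0
  else if hour > 12 then hour - 12
  else hour

-- ===== PRECONDITION & SPEC =====
def Spec_converter_hour (hour : Int) (minute : Int) (out : Int) : Prop := out = converter_hour_alt hour minute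
instance (hour : Int) (minute : Int) (out : Int) : Decidable (Spec_converter_hour hour minute out) := by unfold Spec_converter_hour; infer_instance

-- ===== CLAIM (what is proved, stated in full; the proofs are below) =====
def Claim_equal_converter_hour : Prop := ∀ (hour : Int) (minute : Int), Dom_converter_hour hour minute → Spec_converter_hour hour minute (converter_hour hour minute)

-- ===== LEMMAS AND PROOFS =====

theorem pv_foldl_count (xs : List Int) (c : Int) :
    xs.foldl (fun counter i => if i ≥ 12 then counter + 1 else counter) c
      = c + xs.countP (fun i => decide (12 ≤ i)) := by
  induction xs generalizing c with
  | nil => simp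
  | cons x t ih =>
    simp only [List.foldl_cons, List.countP_cons, ih]
    split_ifs with h <;> simp at * <;> omega

theorem pv_count_range (n : Nat) (h : 12 ≤ n) :
    (List.range n).countP (fun k => decide (12 ≤ k)) = n - 12 := by
  induction n with
  | zero => omega
  | succ m ih =>
    rcases Nat.lt_or_ge m 12 with hm | hm
    · interval_cases m <;> simp_all
    · rw [List.range_succ, List.countP_append]
      have h1 := ih hm
      have h2 : List.countP (fun k => decide (12 ≤ k)) [m] = 1 := by
        simp [hm]
      omega

theorem converter_hour_loop (hour : Int) (h : 12 < hour) :
    (PySem.List.pyRange 0 hour 1).foldl (fun counter i => if i ≥ 12 then counter + 1 else counter) 0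
      = hour - 12 := by
  rw [PySem.List.pyRange_one, pv_foldl_count]
  rw [List.countP_map]
  have hz : (hour - 0).toNat = hour.toNat := by omega
  have hpred : ((fun i : Int => decide (12 ≤ i)) ∘ (fun k : Nat => 0 + (k : Int)))
      = (fun k : Nat => decide (12 ≤ k)) := by
    funext k
    simp only [Function.comp_apply, zero_add]
    exact decide_eq_decide.mpr (by omega)
  rw [hz, hpred, pv_count_range hour.toNat (by omega)]
  omega

-- ===== VERDICT (by name: the statement is the Claim_ definition above) =====
theorem converter_hour_spec : Claim_equal_converter_hour := by
  intro hour minute _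
  unfold Spec_converter_hour converter_hour converter_hour_alt
  split_ifs with h1 h2 h3 h4 h5 <;> try omega
  exact converter_hour_loop hour h1.1
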